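-- pv_equiv track=rewrite | github.com/hanwei7788/LM-auto | automatedtesting/lm-autotest-utilities/autotestservice/sufu_csv2graph.py | reduce_aliases
-- ===== SOURCE A (Python) =====
-- import itertools
--
-- def reduce_aliases(image_names, atom_separator = "-"):
--
-- 	# Using None here to mark an inexistent atom, in case the image names
-- 	# are of different length in atoms. This is correct because None can
-- 	# never be the result of split(); every subatom of list_of_lists must
-- 	# be a str.
-- 	def nth_atoms(list_of_lists, n):
-- 		return [l[n] if len(l) > n else None for l in list_of_lists]
--
-- 	# Absolutely genius! Taken from:
-- 	# https://docs.python.org/3/library/itertools.html#itertools-recipes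
-- 	def all_equal(atoms):
-- 		g = itertools.groupby(atoms)
-- 		return next(g, True) and not next(g, False)
--
-- 	def add_unique_part(reduced_aliases, unique_atoms):
-- 		for reduced_alias, atom in zip(reduced_aliases, unique_atoms):
-- 			if (atom is not None):
-- 				reduced_alias.append(atom)
--
-- 	aliases = [name.split(atom_separator) for name in image_names]
-- 	max_alias_len = max(len(alias) for alias in aliases)
-- 	reduced_aliases = [list() for _ in range(len(aliases))]
-- 	common_parts = []
--
-- 	for i in range(max_alias_len):
-- 		nths = nth_atoms(aliases, i)
-- 		if (all_equal(nths)):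
-- 			common_parts.append(nths[0])
-- 		else:
-- 			add_unique_part(reduced_aliases, nths)
--
-- 	common = atom_separator.join(common_parts)
-- 	unique = [atom_separator.join(atoms) for atoms in reduced_aliases]
--
-- 	return (common, unique)
-- ===== SOURCE B (Python) =====
-- def reduce_aliases(image_names, atom_separator="-"):
--     aliases = [name.split(atom_separator) for name in image_names]
--     max_alias_len = max(len(alias) for alias in aliases)
--     # Pass 1: classify each column index as common (every alias has that
--     # atom and all are equal) and collect the common atoms in order.
--     common_idx = set()
--     common_parts = []
--     for i in range(max_alias_len):
--         col = [alias[i] for alias in aliases if len(alias) > i]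
--         if len(col) == len(aliases) and all(x == col[0] for x in col):
--             common_idx.add(i)
--             common_parts.append(col[0])
--     # Pass 2: rebuild each alias from its own atoms at non-common indices.
--     unique = [
--         atom_separator.join(alias[i] for i in range(len(alias)) if i not in common_idx)
--         for alias in aliases
--     ]
--     return (atom_separator.join(common_parts), unique)
-- ===== Notes on version B (the rewrite author's own statement) =====
-- stated objective: alternative
-- what changed: A interleaves classification and distribution in one column loop that appends atoms to per-row accumulator lists; B first classifies column indices as common (recording the common atoms), then in a separate row-wise pass rebuilds each alias by filtering its own atoms at non-common indices.
import Mathlib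
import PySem

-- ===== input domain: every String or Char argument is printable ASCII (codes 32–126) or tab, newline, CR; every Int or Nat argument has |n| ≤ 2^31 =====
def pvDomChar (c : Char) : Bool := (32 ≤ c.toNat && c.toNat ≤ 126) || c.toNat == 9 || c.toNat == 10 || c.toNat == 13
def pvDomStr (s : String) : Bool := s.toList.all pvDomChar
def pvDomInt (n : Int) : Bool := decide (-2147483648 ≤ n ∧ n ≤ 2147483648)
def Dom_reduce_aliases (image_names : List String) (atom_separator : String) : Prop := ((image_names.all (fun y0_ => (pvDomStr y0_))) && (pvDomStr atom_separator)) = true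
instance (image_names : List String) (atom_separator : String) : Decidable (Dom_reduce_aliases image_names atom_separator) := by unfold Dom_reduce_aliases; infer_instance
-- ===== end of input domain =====

-- B splits A's interleaved column loop into a column-classification pass plus a
-- row-wise reconstruction pass (objective: alternative decomposition, not faster).
-- A raises ValueError on empty input list / empty separator; B raises the same, Pre_ excludes those.

-- ===== PORT A =====
-- l[n] if len(l) > n else None
def pvNthAtoms (lol : List (List String)) (n : Nat) : List (Option String) :=
  lol.map (fun l => if n < l.length then l[n]? else none)

-- itertools.groupby recipe: True iff the list has at most one group of
-- consecutive equal elements, i.e. iff all elements are equal (hand port, exact).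
def pvAllEqual (atoms : List (Option String)) : Bool :=
  match atoms with
  | [] => true
  | x :: xs => xs.all (fun y => y == x)

-- zip(reduced_aliases, unique_atoms) appending each non-None atom to its row
def pvAddUnique (reduced : List (List String)) (nths : List (Option String)) : List (List String) :=
  List.zipWith (fun r a => match a with | some s => r ++ [s] | none => r) reduced nths

-- max(len(alias) for alias in aliases); none only on empty input (Python: ValueError, outside Pre_)
def pvMaxLen (aliases : List (List String)) : Nat :=
  (PySem.List.max? (aliases.map List.length) (fun x => x)).getD 0

def reduce_aliases (image_names : List String) (atom_separator : String) : String × List String :=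
  -- split? is none only for sep = "" (Python: ValueError, outside Pre_)
  let aliases := image_names.map (fun n => (PySem.Str.split? n atom_separator).getD [])
  let maxLen := pvMaxLen aliases
  let st := (List.range maxLen).foldl
    (fun (st : List (List String) × List String) i =>
      let nths := pvNthAtoms aliases i
      if pvAllEqual nths then
        -- nths[0] is never None here when some alias reaches column i (i < maxLen)
        (st.1, st.2 ++ [(nths.headD none).getD ""])
      else (pvAddUnique st.1 nths, st.2))
    (aliases.map (fun _ => ([] : List String)), ([] : List String))
  (PySem.Str.join atom_separator st.2, st.1.map (fun atoms => PySem.Str.join atom_separator atoms))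

-- ===== PORT B =====
-- [alias[i] for alias in aliases if len(alias) > i]
def pvColAt (aliases : List (List String)) (i : Nat) : List String :=
  aliases.filterMap (fun a => if i < a.length then a[i]? else none)

-- len(col) == len(aliases) and all(x == col[0] for x in col)  (col[0] only read when col nonempty)
def pvIsCommon (aliases : List (List String)) (i : Nat) : Bool :=
  let col := pvColAt aliases i
  col.length == aliases.length && col.all (fun x => x == col.headD "")

def reduce_aliases_alt (image_names : List String) (atom_separator : String) : String × List String :=
  let aliases := image_names.map (fun n => (PySem.Str.split? n atom_separator).getD [])
  let maxLen := pvMaxLen aliases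
  -- pass 1: classify columns, collecting (common_idx set, common_parts)
  let cls := (List.range maxLen).foldl
    (fun (st : PySem.Set Nat × List String) i =>
      if pvIsCommon aliases i then (PySem.Set.add st.1 i, st.2 ++ [(pvColAt aliases i).headD ""])
      else st)
    (PySem.Set.empty, ([] : List String))
  -- pass 2: rebuild each alias from its own atoms at non-common indices
  let unique := aliases.map (fun a =>
    PySem.Str.join atom_separator
      ((List.range a.length).filterMap (fun i =>
        if PySem.Set.contains cls.1 i then none else a[i]?)))
  (PySem.Str.join atom_separator cls.2, unique)

-- ===== PRECONDITION & SPEC =====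
-- Pre_ excludes exactly the inputs where A raises ValueError: empty input list (max of
-- empty sequence) and empty separator (str.split("")); B raises the same exceptions there.
def Pre_reduce_aliases (image_names : List String) (atom_separator : String) : Prop :=
  image_names ≠ [] ∧ atom_separator ≠ ""
instance (image_names : List String) (atom_separator : String) : Decidable (Pre_reduce_aliases image_names atom_separator) := by unfold Pre_reduce_aliases; infer_instance
def pvWitness_reduce_aliases : List String × String := (["ab-c-x", "ab-c-y", "ab-d"], "-")

def Spec_reduce_aliases (image_names : List String) (atom_separator : String) (out : String × List String) : Prop := out = reduce_aliases_alt image_names atom_separator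
instance (image_names : List String) (atom_separator : String) (out : String × List String) : Decidable (Spec_reduce_aliases image_names atom_separator out) := by unfold Spec_reduce_aliases; infer_instance

-- ===== CLAIM (what is proved, stated in full; the proofs are below) =====
def Claim_equal_reduce_aliases : Prop := ∀ (image_names : List String) (atom_separator : String), Dom_reduce_aliases image_names atom_separator → Pre_reduce_aliases image_names atom_separator → Spec_reduce_aliases image_names atom_separator (reduce_aliases image_names atom_separator)


-- ===== LEMMAS AND PROOFS =====

-- zipWith composition
theorem pvZipWith_zipWith {α β γ δ : Type} (f : γ → β → δ) (g : α → β → γ) :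
    ∀ (R : List α) (al : List β),
      List.zipWith f (List.zipWith g R al) al = List.zipWith (fun r a => f (g r a) a) R al := by
  intro R
  induction R with
  | nil => intro al; simp
  | cons r R ih =>
    intro al
    cases al with
    | nil => simp
    | cons a al => simp [List.zipWith, ih]

-- zipWith with the first list a constant map of the second
theorem pvZipWith_map_const {α β γ : Type} (c : γ) (h : γ → α → β) :
    ∀ (al : List α),
      List.zipWith h (al.map (fun _ => c)) al = al.map (fun a => h c a) := by
  intro al
  induction al with
  | nil => simp
  | cons a al ih => simp only [List.map_cons, List.zipWith_cons_cons, ih]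

-- identity zipWith on equal lengths
theorem pvZipWith_fst {α β : Type} :
    ∀ (R : List α) (al : List β), R.length = al.length →
      List.zipWith (fun r (_ : β) => r) R al = R := by
  intro R
  induction R with
  | nil => intro al h; simp
  | cons r R ih =>
    intro al h
    cases al with
    | nil => simp at h
    | cons a al =>
      simp only [List.zipWith_cons_cons]
      simp only [List.length_cons, Nat.add_right_cancel_iff] at h
      rw [ih al h]

-- core boolean fact behind the column classification
theorem pvAllEq_core (s : String) (g : List String → Option String) :
    ∀ (t : List (List String)),
      (t.map g).all (fun y => y == some s)
        = (((t.filterMap g).length == t.length) && (t.filterMap g).all (fun x => x == s)) := by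
  intro t
  induction t with
  | nil => simp
  | cons x t ih =>
    simp only [List.map_cons, List.all_cons, List.filterMap_cons, List.length_cons]
    cases hx : g x with
    | none =>
      simp only [hx]
      have hle := List.length_filterMap_le g t
      have h1 : ((none : Option String) == some s) = false := rfl
      have h2 : ((t.filterMap g).length == t.length + 1) = false := by
        rw [beq_eq_false_iff_ne]; omega
      rw [h1, h2, Bool.false_and, Bool.false_and]
    | some y =>
      simp only [hx]
      have h3 : ((some y : Option String) == some s) = (y == s) := rfl
      have h4 : ((t.filterMap g).length + 1 == t.length + 1)
          = ((t.filterMap g).length == t.length) := by simp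
      rw [h3, List.length_cons, h4, List.all_cons, ih, Bool.and_left_comm]

-- column classification agreement: A's all_equal over the padded column equals
-- B's test on the present atoms, whenever some alias reaches column i
theorem pvCol_agree (al : List (List String)) (i : Nat)
    (hne : al ≠ []) (hex : ∃ a ∈ al, i < a.length) :
    pvAllEqual (pvNthAtoms al i) = pvIsCommon al i := by
  cases al with
  | nil => exact absurd rfl hne
  | cons a0 rest =>
    by_cases h0 : i < a0.length
    · -- head atom present
      have hg0 : (if i < a0.length then a0[i]? else none) = some a0[i] := by
        rw [if_pos h0, List.getElem?_eq_getElem h0]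
      simp only [pvAllEqual, pvNthAtoms, pvIsCommon, pvColAt, List.map_cons,
        List.filterMap_cons, hg0, List.length_cons, List.headD_cons]
      rw [pvAllEq_core a0[i] _ rest]
      have h4 : ((rest.filterMap fun a => if i < a.length then a[i]? else none).length + 1
            == rest.length + 1)
          = ((rest.filterMap fun a => if i < a.length then a[i]? else none).length
            == rest.length) := by simp
      rw [h4, List.all_cons]
      have h5 : (a0[i] == a0[i]) = true := by simp
      rw [h5, Bool.true_and]
    · -- head atom missing: both sides are false
      obtain ⟨a, ha, hia⟩ := hex
      have ha' : a ∈ rest := by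
        rcases List.mem_cons.mp ha with h | h
        · exact absurd (h ▸ hia) h0
        · exact h
      have hg0 : (if i < a0.length then a0[i]? else none) = none := by rw [if_neg h0]
      simp only [pvAllEqual, pvNthAtoms, pvIsCommon, pvColAt, List.map_cons,
        List.filterMap_cons, hg0, List.length_cons]
      have hL : ((rest.map fun a : List String => if i < a.length then a[i]? else none).all
          (fun y => y == none)) = false := by
        rw [List.all_eq_false]
        refine ⟨(if i < a.length then a[i]? else none), List.mem_map_of_mem ha', ?_⟩
        rw [if_pos hia, List.getElem?_eq_getElem hia]
        simp
      rw [hL]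
      have hle := List.length_filterMap_le (fun a : List String => if i < a.length then a[i]? else none) rest
      have h2 : ((rest.filterMap fun a => if i < a.length then a[i]? else none).length
          == rest.length + 1) = false := by
        rw [beq_eq_false_iff_ne]; omega
      rw [h2, Bool.false_and]

-- when a column is common, A records the same atom as B
theorem pvCol_atom (al : List (List String)) (i : Nat)
    (hne : al ≠ []) (hex : ∃ a ∈ al, i < a.length)
    (hc : pvAllEqual (pvNthAtoms al i) = true) :
    ((pvNthAtoms al i).headD none).getD "" = (pvColAt al i).headD "" := by
  cases al with
  | nil => exact absurd rfl hne
  | cons a0 rest =>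
    by_cases h0 : i < a0.length
    · have hg0 : (if i < a0.length then a0[i]? else none) = some a0[i] := by
        rw [if_pos h0, List.getElem?_eq_getElem h0]
      simp only [pvNthAtoms, pvColAt, List.map_cons, List.filterMap_cons, hg0,
        List.headD_cons, Option.getD_some]
    · exfalso
      obtain ⟨a, ha, hia⟩ := hex
      have ha' : a ∈ rest := by
        rcases List.mem_cons.mp ha with h | h
        · exact absurd (h ▸ hia) h0
        · exact h
      have hg0 : (if i < a0.length then a0[i]? else none) = none := by rw [if_neg h0]
      simp only [pvAllEqual, pvNthAtoms, List.map_cons, hg0] at hc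
      rw [List.all_eq_true] at hc
      have hmem := hc _ (List.mem_map_of_mem ha')
      rw [if_pos hia, List.getElem?_eq_getElem hia] at hmem
      exact absurd hmem (by simp)

-- A's interleaved column loop, characterised: each row accumulates its non-common
-- present atoms, and the common parts accumulate in column order
theorem pvFoldA (al : List (List String)) (L : List Nat)
    (hA : ∀ i ∈ L, pvAllEqual (pvNthAtoms al i) = pvIsCommon al i)
    (hAt : ∀ i ∈ L, pvIsCommon al i = true →
      ((pvNthAtoms al i).headD none).getD "" = (pvColAt al i).headD "") :
    ∀ (R : List (List String)) (C : List String), R.length = al.length →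
      L.foldl (fun (st : List (List String) × List String) i =>
          if pvAllEqual (pvNthAtoms al i) then (st.1, st.2 ++ [((pvNthAtoms al i).headD none).getD ""])
          else (pvAddUnique st.1 (pvNthAtoms al i), st.2)) (R, C)
      = (List.zipWith (fun r a => r ++ L.filterMap (fun i =>
            if pvIsCommon al i then none
            else if i < a.length then a[i]? else none)) R al,
         C ++ L.filterMap (fun i =>
            if pvIsCommon al i then some ((pvColAt al i).headD "") else none)) := by
  induction L with
  | nil =>
    intro R C hlen
    simp only [List.foldl_nil, List.filterMap_nil, List.append_nil]
    rw [pvZipWith_fst R al hlen]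
  | cons i L ih =>
    intro R C hlen
    have hA' : ∀ j ∈ L, pvAllEqual (pvNthAtoms al j) = pvIsCommon al j :=
      fun j hj => hA j (List.mem_cons_of_mem i hj)
    have hAt' : ∀ j ∈ L, pvIsCommon al j = true →
        ((pvNthAtoms al j).headD none).getD "" = (pvColAt al j).headD "" :=
      fun j hj => hAt j (List.mem_cons_of_mem i hj)
    rw [List.foldl_cons]
    by_cases hC : pvIsCommon al i = true
    · have hstep : pvAllEqual (pvNthAtoms al i) = true := by
        rw [hA i List.mem_cons_self]; exact hC
      simp only [hstep, if_pos]
      rw [ih hA' hAt' R (C ++ [((pvNthAtoms al i).headD none).getD ""]) hlen]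
      rw [hAt i List.mem_cons_self hC]
      refine Prod.ext ?_ ?_ <;> simp [List.filterMap_cons, hC]
    · have hstep : pvAllEqual (pvNthAtoms al i) = false := by
        rw [hA i List.mem_cons_self]; simp [hC]
      simp only [hstep, Bool.false_eq_true, if_neg, not_false_iff]
      have hlen' : (pvAddUnique R (pvNthAtoms al i)).length = al.length := by
        simp [pvAddUnique, List.length_zipWith, pvNthAtoms, hlen]
      rw [ih hA' hAt' (pvAddUnique R (pvNthAtoms al i)) C hlen']
      refine Prod.ext ?_ ?_
      · show List.zipWith _ (pvAddUnique R (pvNthAtoms al i)) al = _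
        unfold pvAddUnique pvNthAtoms
        rw [List.zipWith_map_right, pvZipWith_zipWith]
        congr 1
        funext r a
        cases h : (if i < a.length then a[i]? else none) with
        | none => simp [List.filterMap_cons, hC, h]
        | some s => simp [List.filterMap_cons, hC, h]
      · show C ++ _ = C ++ _
        simp [List.filterMap_cons, hC]

-- B's classification loop: the collected parts list
theorem pvFoldB_snd (al : List (List String)) :
    ∀ (L : List Nat) (s : PySem.Set Nat) (p : List String),
      (L.foldl (fun (st : PySem.Set Nat × List String) i =>
          if pvIsCommon al i then (PySem.Set.add st.1 i, st.2 ++ [(pvColAt al i).headD ""])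
          else st) (s, p)).2
      = p ++ L.filterMap (fun i =>
          if pvIsCommon al i then some ((pvColAt al i).headD "") else none) := by
  intro L
  induction L with
  | nil => intro s p; simp
  | cons i L ih =>
    intro s p
    rw [List.foldl_cons]
    by_cases hC : pvIsCommon al i = true
    · simp only [hC, if_pos]
      rw [ih]
      simp [List.filterMap_cons, hC]
    · simp only [hC, Bool.false_eq_true, if_neg, not_false_iff]
      rw [ih]
      simp [List.filterMap_cons, hC]

-- B's classification loop: membership in the collected index set
theorem pvFoldB_fst (al : List (List String)) :
    ∀ (L : List Nat) (s : PySem.Set Nat) (p : List String) (j : Nat),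
      (j ∈ (L.foldl (fun (st : PySem.Set Nat × List String) i =>
          if pvIsCommon al i then (PySem.Set.add st.1 i, st.2 ++ [(pvColAt al i).headD ""])
          else st) (s, p)).1
        ↔ j ∈ s ∨ (j ∈ L ∧ pvIsCommon al j = true)) := by
  intro L
  induction L with
  | nil => intro s p j; simp
  | cons i L ih =>
    intro s p j
    rw [List.foldl_cons]
    by_cases hC : pvIsCommon al i = true
    · simp only [hC, if_pos]
      rw [ih]
      rw [PySem.Set.mem_add]
      constructor
      · rintro ((hs | hji) | ⟨hjL, hCj⟩)
        · exact Or.inl hs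
        · exact Or.inr ⟨List.mem_cons.mpr (Or.inl hji), hji ▸ hC⟩
        · exact Or.inr ⟨List.mem_cons_of_mem i hjL, hCj⟩
      · rintro (hs | ⟨hjiL, hCj⟩)
        · exact Or.inl (Or.inl hs)
        · rcases List.mem_cons.mp hjiL with hji | hjL
          · exact Or.inl (Or.inr hji)
          · exact Or.inr ⟨hjL, hCj⟩
    · simp only [hC, Bool.false_eq_true, if_neg, not_false_iff]
      rw [ih]
      constructor
      · rintro (hs | ⟨hjL, hCj⟩)
        · exact Or.inl hs
        · exact Or.inr ⟨List.mem_cons_of_mem i hjL, hCj⟩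
      · rintro (hs | ⟨hjiL, hCj⟩)
        · exact Or.inl hs
        · rcases List.mem_cons.mp hjiL with hji | hjL
          · exact absurd (hji ▸ hCj) (by simp [hC])
          · exact Or.inr ⟨hjL, hCj⟩

-- every column index below the maximum is reached by some alias
theorem pvMaxLen_ex (al : List (List String)) (i : Nat) (h : i < pvMaxLen al) :
    ∃ a ∈ al, i < a.length := by
  unfold pvMaxLen at h
  cases hm : PySem.List.max? (al.map List.length) (fun x => x) with
  | none => rw [hm] at h; simp at h
  | some m =>
    rw [hm] at h
    have := PySem.List.max?_mem hm
    rcases List.mem_map.mp this with ⟨a, ha, hlen⟩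
    exact ⟨a, ha, hlen ▸ h⟩

-- every alias length is at most the maximum
theorem pvMaxLen_le (al : List (List String)) (a : List String) (ha : a ∈ al) :
    a.length ≤ pvMaxLen al := by
  unfold pvMaxLen
  cases hm : PySem.List.max? (al.map List.length) (fun x => x) with
  | none =>
    rw [PySem.List.max?_eq_none_iff] at hm
    simp only [List.map_eq_nil_iff] at hm
    exact absurd ha (by simp [hm])
  | some m =>
    have := PySem.List.max?_isMax hm a.length (List.mem_map_of_mem ha)
    simpa using this

theorem reduce_aliases_spec : Claim_equal_reduce_aliases := by
  intro names sep _ hpre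
  obtain ⟨hne, _⟩ := hpre
  show reduce_aliases names sep = reduce_aliases_alt names sep
  unfold reduce_aliases reduce_aliases_alt
  dsimp only
  set al := names.map (fun n => (PySem.Str.split? n sep).getD []) with hal
  have halne : al ≠ [] := by
    simp only [hal, ne_eq, List.map_eq_nil_iff]
    exact hne
  set M := pvMaxLen al with hM
  have hA : ∀ i ∈ List.range M, pvAllEqual (pvNthAtoms al i) = pvIsCommon al i := by
    intro i hi
    exact pvCol_agree al i halne (pvMaxLen_ex al i (List.mem_range.mp hi))
  have hAt : ∀ i ∈ List.range M, pvIsCommon al i = true →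
      ((pvNthAtoms al i).headD none).getD "" = (pvColAt al i).headD "" := by
    intro i hi hC
    refine pvCol_atom al i halne (pvMaxLen_ex al i (List.mem_range.mp hi)) ?_
    rw [pvCol_agree al i halne (pvMaxLen_ex al i (List.mem_range.mp hi))]
    exact hC
  have hlen0 : (al.map (fun _ => ([] : List String))).length = al.length := List.length_map ..
  rw [pvFoldA al (List.range M) hA hAt (al.map (fun _ => ([] : List String))) [] hlen0]
  rw [pvZipWith_map_const]
  rw [pvFoldB_snd al (List.range M) PySem.Set.empty []]
  simp only [List.nil_append]
  refine Prod.ext rfl ?_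
  show (al.map _).map (fun atoms => PySem.Str.join sep atoms) = al.map _
  rw [List.map_map]
  apply List.map_congr_left
  intro a ha
  dsimp only
  show PySem.Str.join sep _ = PySem.Str.join sep _
  congr 1
  -- the per-row atom lists agree
  have haM : a.length ≤ M := pvMaxLen_le al a ha
  have hsplit : List.range M = List.range a.length
      ++ (List.range (M - a.length)).map (fun x => a.length + x) := by
    rw [← List.range_add]
    congr 1
    omega
  conv_lhs => rw [hsplit]
  beta_reduce
  rw [List.filterMap_append]
  have htail : (List.filterMap (fun i =>
      if pvIsCommon al i then none
      else if i < a.length then a[i]? else none)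
      ((List.range (M - a.length)).map (fun x => a.length + x))) = [] := by
    rw [List.filterMap_eq_nil_iff]
    intro j hj
    rcases List.mem_map.mp hj with ⟨x, _, hx⟩
    have hge : ¬ j < a.length := by omega
    by_cases hC : pvIsCommon al j = true
    · simp [hC]
    · simp [hC, hge]
  rw [htail, List.append_nil]
  apply List.filterMap_congr
  intro j hj
  have hja : j < a.length := List.mem_range.mp hj
  have hjM : j < M := Nat.lt_of_lt_of_le hja haM
  have hmem := pvFoldB_fst al (List.range M) PySem.Set.empty [] j
  by_cases hC : pvIsCommon al j = true
  · have hcont : PySem.Set.contains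
        ((List.range M).foldl (fun (st : PySem.Set Nat × List String) i =>
          if pvIsCommon al i then (PySem.Set.add st.1 i, st.2 ++ [(pvColAt al i).headD ""])
          else st) (PySem.Set.empty, [])).1 j = true := by
      rw [PySem.Set.contains_iff, hmem]
      exact Or.inr ⟨List.mem_range.mpr hjM, hC⟩
    rw [hC, hcont]
    simp
  · have hcont : PySem.Set.contains
        ((List.range M).foldl (fun (st : PySem.Set Nat × List String) i =>
          if pvIsCommon al i then (PySem.Set.add st.1 i, st.2 ++ [(pvColAt al i).headD ""])
          else st) (PySem.Set.empty, [])).1 j = false := by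
      rw [Bool.eq_false_iff, ne_eq, PySem.Set.contains_iff, hmem]
      rintro (h | ⟨_, hCj⟩)
      · simp [PySem.Set.empty] at h
      · exact hC hCj
    simp only [hC, hcont, Bool.false_eq_true, if_neg, not_false_iff, if_pos hja]
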